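-- pv_equiv track=rewrite | github.com/ba3ai/Clarus-Updated | backend/routes/excel_routes.py | _has_balance_labels
-- ===== SOURCE A (Python) =====
-- from typing import Dict, Any, List, Tuple, Optional
--
-- def _has_balance_labels(values: List[List]) -> bool:
--     # For new format we still expect at least "Beginning Balance" and maybe "Ending Balance" in header.
--     labels = {
--         "beginning balance",
--         "ending balance",
--         "gross profit",
--         "management fees",
--         "operating expenses",
--         "allocated fees",
--         "additions",
--         "withdrawals",
--     }
--     limit = min(250, len(values))
--     for r in range(limit):
--         row = values[r] or []
--         for cell in row:
--             txt = str(cell or "").strip().lower()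
--             if txt in labels:
--                 return True
--     return False
-- ===== SOURCE B (Python) =====
-- # Sorted-merge (two-pointer) re-implementation: sort the distinct normalized
-- # cell texts of the first 250 rows, then sweep them against the pre-sorted
-- # label list with two pointers instead of per-cell set membership.
-- _SORTED_LABELS = [
--     "additions",
--     "allocated fees",
--     "beginning balance",
--     "ending balance",
--     "gross profit",
--     "management fees",
--     "operating expenses",
--     "withdrawals",
-- ]
--
-- def _has_balance_labels(values):
--     cells = sorted({str(cell or "").strip().lower()
--                     for row in values[:250] for cell in (row or [])})
--     labels = _SORTED_LABELS
--     i = j = 0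
--     while i < len(labels) and j < len(cells):
--         if labels[i] == cells[j]:
--             return True
--         if labels[i] < cells[j]:
--             i += 1
--         else:
--             j += 1
--     return False
-- ===== Notes on version B (the rewrite author's own statement) =====
-- stated objective: alternative
-- what changed: Replaces A's per-cell hash-set membership test with early return by a sorted-merge: sort the distinct normalized cell texts, then intersect with the pre-sorted label list via a two-pointer sweep.
import Mathlib
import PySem

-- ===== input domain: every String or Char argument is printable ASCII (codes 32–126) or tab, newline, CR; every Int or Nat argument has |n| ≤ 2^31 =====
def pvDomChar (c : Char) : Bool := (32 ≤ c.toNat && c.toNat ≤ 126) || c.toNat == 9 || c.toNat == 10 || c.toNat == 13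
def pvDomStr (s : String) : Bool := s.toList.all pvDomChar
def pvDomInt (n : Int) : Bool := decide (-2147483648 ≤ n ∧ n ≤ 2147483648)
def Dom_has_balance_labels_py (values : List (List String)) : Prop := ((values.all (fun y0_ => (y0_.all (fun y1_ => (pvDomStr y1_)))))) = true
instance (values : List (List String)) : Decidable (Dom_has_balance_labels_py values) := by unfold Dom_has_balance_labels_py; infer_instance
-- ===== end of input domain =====

-- B replaces A's per-cell set-membership scan with early return by a sorted-merge: sort the distinct normalized cells, then a two-pointer sweep against the pre-sorted labels (objective: alternative; same result, no speed claim).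

-- ===== PORT A =====
-- labels as a Python set, built as in A
def pvLabels : PySem.Set String := PySem.Set.ofList
  ["beginning balance", "ending balance", "gross profit", "management fees",
   "operating expenses", "allocated fees", "additions", "withdrawals"]

-- txt = str(cell or "").strip().lower()  ('cell or ""' is the identity on strings)
def pvNorm (s : String) : String := PySem.Str.lower (PySem.Str.strip s)

-- inner 'for cell in row: … return True'
def hbRowA : List String → Bool
  | [] => false
  | c :: cs => if PySem.Set.contains pvLabels (pvNorm c) then true else hbRowA cs

-- outer 'for r in range(limit)' over the index list; 'values[r] or []' (identity on lists)
def hbIdxA (values : List (List String)) : List Nat → Bool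
  | [] => false
  | r :: rs => if hbRowA (PySem.List.pyGetD values (r : Int) []) then true else hbIdxA values rs

def has_balance_labels_py (values : List (List String)) : Bool :=
  hbIdxA values (List.range (min 250 values.length))

-- ===== PORT B =====
-- the module constant _SORTED_LABELS (written sorted in Source B)
def pvSortedLabels : List String :=
  ["additions", "allocated fees", "beginning balance", "ending balance",
   "gross profit", "management fees", "operating expenses", "withdrawals"]

-- the two-pointer while loop: advance into whichever list has the smaller head
def hbMergeB : List String → List String → Bool
  | [], _ => false
  | _ :: _, [] => false
  | a :: as, c :: cs =>
      if a == c then true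
      else if a < c then hbMergeB as (c :: cs)
      else hbMergeB (a :: as) cs

-- cells = sorted({str(cell or "").strip().lower() for row in values[:250] for cell in (row or [])})
def has_balance_labels_py_alt (values : List (List String)) : Bool :=
  let cells : List String :=
    PySem.List.sorted
      (PySem.Set.ofList ((PySem.List.slice values none (some 250)).flatMap (fun row => row.map pvNorm)))
      (fun x => x) false
  hbMergeB pvSortedLabels cells

-- ===== PRECONDITION & SPEC =====
def Spec_has_balance_labels_py (values : List (List String)) (out : Bool) : Prop := out = has_balance_labels_py_alt values
instance (values : List (List String)) (out : Bool) : Decidable (Spec_has_balance_labels_py values out) := by unfold Spec_has_balance_labels_py; infer_instance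

-- ===== CLAIM (what is proved, stated in full; the proofs are below) =====
def Claim_equal_has_balance_labels_py : Prop := ∀ (values : List (List String)), Dom_has_balance_labels_py values → Spec_has_balance_labels_py values (has_balance_labels_py values)

-- ===== LEMMAS AND PROOFS =====

theorem hbRowA_eq_any (row : List String) :
    hbRowA row = row.any (fun c => PySem.Set.contains pvLabels (pvNorm c)) := by
  induction row with
  | nil => rfl
  | cons c cs ih => simp [hbRowA, ih]

theorem hbIdxA_eq_any (values : List (List String)) (rs : List Nat) :
    hbIdxA values rs = rs.any (fun r => hbRowA (PySem.List.pyGetD values (r : Int) [])) := by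
  induction rs with
  | nil => rfl
  | cons r rest ih => simp [hbIdxA, ih]

theorem A_iff (values : List (List String)) :
    has_balance_labels_py values = true ↔
      ∃ c ∈ (values.take 250).flatten, PySem.Set.contains pvLabels (pvNorm c) := by
  unfold has_balance_labels_py
  rw [hbIdxA_eq_any]
  simp only [List.any_eq_true, List.mem_range, hbRowA_eq_any, List.mem_flatten,
    PySem.List.pyGetD_natCast]
  constructor
  · rintro ⟨r, hr, c, hc, hp⟩
    have hlt : r < values.length := lt_of_lt_of_le hr (min_le_right _ _)
    rw [List.getD_eq_getElem _ _ hlt] at hc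
    refine ⟨c, ⟨values[r], ?_, hc⟩, hp⟩
    refine List.mem_iff_getElem.mpr ⟨r, by simpa using hr, ?_⟩
    simp [List.getElem_take]
  · rintro ⟨c, ⟨row, hrow, hc⟩, hp⟩
    rcases List.mem_iff_getElem.mp hrow with ⟨r, hr, hEq⟩
    have hr' : r < min 250 values.length := by simpa using hr
    have hlt : r < values.length := lt_of_lt_of_le hr' (min_le_right _ _)
    refine ⟨r, hr', c, ?_, hp⟩
    rw [List.getD_eq_getElem _ _ hlt]
    have : values[r] = row := by simpa [List.getElem_take] using hEq
    rw [this]; exact hc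

-- two-pointer sweep over sorted lists finds a hit iff the lists share an element
theorem hbMergeB_iff : ∀ (l1 l2 : List String),
    l1.Pairwise (· ≤ ·) → l2.Pairwise (· ≤ ·) →
    (hbMergeB l1 l2 = true ↔ ∃ x, x ∈ l1 ∧ x ∈ l2) := by
  intro l1 l2 h1 h2
  fun_induction hbMergeB l1 l2 with
  | case1 l2 => simp
  | case2 a as => simp
  | case3 a as c cs heq =>
      have hac : a = c := by simpa using heq
      subst hac
      simp only [true_iff]
      exact ⟨a, by simp, by simp⟩
  | case4 a as c cs heq hlt ih =>
      rw [List.pairwise_cons] at h1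
      rw [ih h1.2 h2]
      constructor
      · rintro ⟨x, hx1, hx2⟩; exact ⟨x, List.mem_cons_of_mem _ hx1, hx2⟩
      · rintro ⟨x, hx1, hx2⟩
        rcases List.mem_cons.mp hx1 with rfl | hx1'
        · rw [List.pairwise_cons] at h2
          rcases List.mem_cons.mp hx2 with rfl | hx2'
          · exact absurd hlt (lt_irrefl _)
          · exact absurd (lt_of_lt_of_le hlt (h2.1 _ hx2')) (lt_irrefl _)
        · exact ⟨x, hx1', hx2⟩
  | case5 a as c cs heq hnlt ih =>
      rw [List.pairwise_cons] at h2
      rw [ih h1 h2.2]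
      constructor
      · rintro ⟨x, hx1, hx2⟩; exact ⟨x, hx1, List.mem_cons_of_mem _ hx2⟩
      · rintro ⟨x, hx1, hx2⟩
        have hne : a ≠ c := by simpa using heq
        have hca : c < a := lt_of_le_of_ne (le_of_not_gt hnlt) (fun h => hne h.symm)
        rcases List.mem_cons.mp hx2 with rfl | hx2'
        · rw [List.pairwise_cons] at h1
          rcases List.mem_cons.mp hx1 with rfl | hx1'
          · exact absurd hca (lt_irrefl _)
          · exact absurd (lt_of_lt_of_le hca (h1.1 _ hx1')) (lt_irrefl _)
        · exact ⟨x, hx1, hx2'⟩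

theorem labels_pairwise : pvSortedLabels.Pairwise (· ≤ ·) := by
  have h : pvSortedLabels.Pairwise (fun a b => a.toList ≤ b.toList) := by decide
  exact h.imp (fun hab => String.le_iff_toList_le.mpr hab)

-- membership in the two label lists coincides (same 8 strings, reordered)
theorem mem_labels_iff (x : String) :
    x ∈ pvSortedLabels ↔ PySem.Set.contains pvLabels x = true := by
  rw [PySem.Set.contains_iff]
  simp only [pvSortedLabels, pvLabels, PySem.Set.mem_ofList, List.mem_cons, List.not_mem_nil,
    or_false]
  tauto

theorem B_iff (values : List (List String)) :
    has_balance_labels_py_alt values = true ↔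
      ∃ c ∈ (values.take 250).flatten, PySem.Set.contains pvLabels (pvNorm c) := by
  unfold has_balance_labels_py_alt
  have hslice : PySem.List.slice values none (some 250) = values.take 250 := by
    simp [pysem]
  rw [hslice]
  rw [hbMergeB_iff _ _ labels_pairwise
    (PySem.List.sorted_pairwise
      (PySem.Set.ofList ((values.take 250).flatMap (fun row => row.map pvNorm))) (fun x => x))]
  constructor
  · rintro ⟨x, hx1, hx2⟩
    rw [PySem.List.mem_sorted, PySem.Set.mem_ofList] at hx2
    rcases List.mem_flatMap.mp hx2 with ⟨row, hrow, hc⟩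
    rcases List.mem_map.mp hc with ⟨c, hcrow, rfl⟩
    exact ⟨c, List.mem_flatten.mpr ⟨row, hrow, hcrow⟩, (mem_labels_iff _).mp hx1⟩
  · rintro ⟨c, hc, hp⟩
    refine ⟨pvNorm c, (mem_labels_iff _).mpr hp, ?_⟩
    rw [PySem.List.mem_sorted, PySem.Set.mem_ofList]
    rcases List.mem_flatten.mp hc with ⟨row, hrow, hcrow⟩
    exact List.mem_flatMap.mpr ⟨row, hrow, List.mem_map.mpr ⟨c, hcrow, rfl⟩⟩

-- ===== VERDICT (by name: the statement is the Claim_ definition above) =====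
theorem has_balance_labels_py_spec : Claim_equal_has_balance_labels_py := by
  intro values _
  unfold Spec_has_balance_labels_py
  rw [Bool.eq_iff_iff, A_iff, B_iff]
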